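-- pv_equiv track=rewrite | github.com/ariuk44/retake_exam_prep | day_1.py | isOddHeavy
-- ===== SOURCE A (Python) =====
-- def isOddHeavy(arr):
--     even_vals = []
--     odd_vals = []
--     for i in arr:
--         if i % 2 == 0:
--             even_vals.append(i)
--         else:
--             odd_vals.append(i)
--     if not odd_vals:
--         return 0
--     if even_vals and max(even_vals) > min(odd_vals):
--         return 0
--     return 1
-- ===== SOURCE B (Python) =====
-- def isOddHeavy(arr):
--     if all(x % 2 == 0 for x in arr):
--         return 0
--     for e in arr:
--         if e % 2 == 0:
--             for o in arr:
--                 if o % 2 != 0 and e > o: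
--                     return 0
--     return 1
-- ===== Notes on version B (the rewrite author's own statement) =====
-- stated objective: alternative
-- what changed: B never computes max/min at all: it returns 0 when every element is even, then brute-force searches for any even/odd pair with even > odd (which exists iff max(evens) > min(odds)), replacing A's partition-into-lists-then-max/min strategy by a pairwise existential test.
import Mathlib
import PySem

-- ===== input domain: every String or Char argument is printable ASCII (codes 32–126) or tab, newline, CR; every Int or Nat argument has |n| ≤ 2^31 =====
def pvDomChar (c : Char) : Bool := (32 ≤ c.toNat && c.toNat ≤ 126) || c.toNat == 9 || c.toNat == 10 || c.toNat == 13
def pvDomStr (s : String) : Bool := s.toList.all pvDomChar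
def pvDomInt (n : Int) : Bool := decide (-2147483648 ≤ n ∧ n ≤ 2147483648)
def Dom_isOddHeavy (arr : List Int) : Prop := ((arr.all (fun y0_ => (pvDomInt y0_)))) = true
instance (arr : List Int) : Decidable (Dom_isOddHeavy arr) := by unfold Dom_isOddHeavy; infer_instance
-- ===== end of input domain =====

-- B drops max()/min() entirely: it answers 0 when all elements are even, otherwise searches
-- for any even/odd pair with even > odd (such a pair exists iff max(evens) > min(odds));
-- an alternative decomposition, equal on all inputs.

-- ===== PORT A =====
def isOddHeavy (arr : List Int) : Int :=
  let p := arr.foldl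
    (fun (s : List Int × List Int) i =>
      if PySem.Int.mod i 2 = 0 then (s.1 ++ [i], s.2) else (s.1, s.2 ++ [i]))
    ([], [])
  if p.2 = [] then 0
  else if p.1 ≠ [] ∧ (PySem.List.max? p.1 (fun y => y)).getD 0 > (PySem.List.min? p.2 (fun y => y)).getD 0 then 0
  else 1

-- ===== PORT B =====
def isOddHeavy_alt (arr : List Int) : Int :=
  if arr.all (fun x => PySem.Int.mod x 2 == 0) then 0
  else if arr.any (fun e => PySem.Int.mod e 2 == 0 &&
          arr.any (fun o => !(PySem.Int.mod o 2 == 0) && decide (e > o))) then 0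
  else 1

-- ===== PRECONDITION & SPEC =====
def Spec_isOddHeavy (arr : List Int) (out : Int) : Prop := out = isOddHeavy_alt arr
instance (arr : List Int) (out : Int) : Decidable (Spec_isOddHeavy arr out) := by unfold Spec_isOddHeavy; infer_instance

-- ===== CLAIM (what is proved, stated in full; the proofs are below) =====
def Claim_equal_isOddHeavy : Prop := ∀ (arr : List Int), Dom_isOddHeavy arr → Spec_isOddHeavy arr (isOddHeavy arr)

-- ===== LEMMAS AND PROOFS =====

-- A's partition loop builds exactly the two filters of arr
theorem pv_partition (arr : List Int) : ∀ (ev od : List Int),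
    arr.foldl
      (fun (s : List Int × List Int) i =>
        if PySem.Int.mod i 2 = 0 then (s.1 ++ [i], s.2) else (s.1, s.2 ++ [i]))
      (ev, od)
    = (ev ++ arr.filter (fun i => PySem.Int.mod i 2 == 0),
       od ++ arr.filter (fun i => !(PySem.Int.mod i 2 == 0))) := by
  induction arr with
  | nil => intro ev od; simp
  | cons i t ih =>
    intro ev od
    simp only [List.foldl]
    by_cases h : PySem.Int.mod i 2 = 0
    · have hb : (PySem.Int.mod i 2 == 0) = true := by simpa using h
      rw [if_pos h, ih (ev ++ [i]) od, List.filter_cons, List.filter_cons, hb]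
      simp
    · have hb : (PySem.Int.mod i 2 == 0) = false := by simpa using h
      rw [if_neg h, ih ev (od ++ [i]), List.filter_cons, List.filter_cons, hb]
      simp
-- "all even" is the same test as "the odd filter is empty"
theorem pv_all_iff (arr : List Int) :
    (arr.all (fun x => PySem.Int.mod x 2 == 0)) = true
    ↔ arr.filter (fun i => !(PySem.Int.mod i 2 == 0)) = [] := by
  rw [List.all_eq_true, List.filter_eq_nil_iff]
  constructor
  · intro h x hx
    rw [h x hx]
    simp
  · intro h x hx
    have := h x hx
    revert this
    cases (PySem.Int.mod x 2 == 0) <;> simp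

-- B's nested any is the pairwise existence over the two filters
theorem pv_any_iff (arr : List Int) :
    (arr.any (fun e => PySem.Int.mod e 2 == 0 &&
        arr.any (fun o => !(PySem.Int.mod o 2 == 0) && decide (e > o)))) = true
    ↔ ∃ e ∈ arr.filter (fun i => PySem.Int.mod i 2 == 0),
        ∃ o ∈ arr.filter (fun i => !(PySem.Int.mod i 2 == 0)), e > o := by
  simp only [List.any_eq_true, Bool.and_eq_true, decide_eq_true_eq, List.mem_filter]
  constructor
  · rintro ⟨e, he, hep, o, ho, hop, hgt⟩
    exact ⟨e, ⟨he, hep⟩, o, ⟨ho, hop⟩, hgt⟩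
  · rintro ⟨e, ⟨he, hep⟩, o, ⟨ho, hop⟩, hgt⟩
    exact ⟨e, he, hep, o, ho, hop, hgt⟩

-- A's max/min comparison holds iff some even exceeds some odd (odd side nonempty)
theorem pv_key (ev od : List Int) (hzero : od ≠ []) :
    (ev ≠ [] ∧ (PySem.List.max? ev (fun y => y)).getD 0 > (PySem.List.min? od (fun y => y)).getD 0)
    ↔ ∃ e ∈ ev, ∃ o ∈ od, e > o := by
  obtain ⟨o0, oh⟩ : ∃ o0, PySem.List.min? od (fun y => y) = some o0 := by
    cases h : PySem.List.min? od (fun y => y) with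
    | none => exact absurd ((PySem.List.min?_eq_none_iff _ _).mp h) hzero
    | some m => exact ⟨m, rfl⟩
  constructor
  · rintro ⟨hne, hgt⟩
    obtain ⟨e0, eh⟩ : ∃ e0, PySem.List.max? ev (fun y => y) = some e0 := by
      cases h : PySem.List.max? ev (fun y => y) with
      | none => exact absurd ((PySem.List.max?_eq_none_iff _ _).mp h) hne
      | some m => exact ⟨m, rfl⟩
    rw [eh, oh] at hgt
    simp only [Option.getD_some] at hgt
    exact ⟨e0, PySem.List.max?_mem eh, o0, PySem.List.min?_mem oh, hgt⟩
  · rintro ⟨e, he, o, ho, hgt⟩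
    have hne : ev ≠ [] := by rintro rfl; simp at he
    refine ⟨hne, ?_⟩
    obtain ⟨e0, eh⟩ : ∃ e0, PySem.List.max? ev (fun y => y) = some e0 := by
      cases h : PySem.List.max? ev (fun y => y) with
      | none => exact absurd ((PySem.List.max?_eq_none_iff _ _).mp h) hne
      | some m => exact ⟨m, rfl⟩
    have hle : e ≤ e0 := PySem.List.max?_isMax eh e he
    have hlo : o0 ≤ o := PySem.List.min?_isMin oh o ho
    rw [eh, oh]
    simp only [Option.getD_some]
    omega

-- ===== VERDICT (by name: the statement is the Claim_ definition above) =====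
theorem isOddHeavy_spec : Claim_equal_isOddHeavy := by
  intro arr _
  unfold Spec_isOddHeavy isOddHeavy isOddHeavy_alt
  rw [pv_partition arr [] []]
  simp only [List.nil_append]
  by_cases hzero : arr.filter (fun i => !(PySem.Int.mod i 2 == 0)) = []
  · rw [if_pos hzero, if_pos ((pv_all_iff arr).mpr hzero)]
  · have hBall : (arr.all (fun x => PySem.Int.mod x 2 == 0)) = false := by
      cases hq : arr.all (fun x => PySem.Int.mod x 2 == 0) with
      | true => exact absurd ((pv_all_iff arr).mp hq) hzero
      | false => rfl
    rw [if_neg hzero]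
    by_cases hA : arr.filter (fun i => PySem.Int.mod i 2 == 0) ≠ [] ∧
        (PySem.List.max? (arr.filter (fun i => PySem.Int.mod i 2 == 0)) (fun y => y)).getD 0 >
        (PySem.List.min? (arr.filter (fun i => !(PySem.Int.mod i 2 == 0))) (fun y => y)).getD 0
    · have hB : (arr.any (fun e => PySem.Int.mod e 2 == 0 &&
          arr.any (fun o => !(PySem.Int.mod o 2 == 0) && decide (e > o)))) = true :=
        (pv_any_iff arr).mpr ((pv_key _ _ hzero).mp hA)
      rw [if_pos hA, if_neg (by intro hc; rw [hc] at hBall; exact absurd hBall (by decide) : ¬ ((arr.all fun x => PySem.Int.mod x 2 == 0) = true)), if_pos hB]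
    · have hB : (arr.any (fun e => PySem.Int.mod e 2 == 0 &&
          arr.any (fun o => !(PySem.Int.mod o 2 == 0) && decide (e > o)))) = false := by
        cases hq : arr.any (fun e => PySem.Int.mod e 2 == 0 &&
            arr.any (fun o => !(PySem.Int.mod o 2 == 0) && decide (e > o))) with
        | true => exact absurd ((pv_key _ _ hzero).mpr ((pv_any_iff arr).mp hq)) hA
        | false => rfl
      rw [if_neg hA, if_neg (by intro hc; rw [hc] at hBall; exact absurd hBall (by decide) : ¬ ((arr.all fun x => PySem.Int.mod x 2 == 0) = true)),
        if_neg (by intro hc; rw [hc] at hB; exact absurd hB (by decide) :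
          ¬ ((arr.any fun e => PySem.Int.mod e 2 == 0 &&
          arr.any fun o => !(PySem.Int.mod o 2 == 0) && decide (e > o)) = true))]
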